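-- pv_equiv track=rewrite | github.com/Seonghun337/algorithm | StudyLog/BOJ_2529_부등호.py | getValidIneqs
-- ===== SOURCE A (Python) =====
-- def getValidIneqs(ineqs, reverse = False):
--     if reverse: # >
--         n = len(ineqs)+1
--         result = [0 for _ in range(n)]
--         for i in range(n-2,-1,-1):
--             if ineqs[i] == '>':
--                 for j in range(i,-1,-1):
--                     result[j] = result[j] + 1
--                     if j > 0 and ineqs[j-1] != '>':
--                         break
--         return result
--     else: # <
--         # n = len(ineqs)+1
--         # result = [0 for _ in range(n)]
--         # for i in range(len(ineqs)):
--         #     if ineqs[i] == '<':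
--         #         for j in range(i+1,n):
--         #             result[j] = result[j] + 1
--         #             if j < n-1 and ineqs[j] != '<':
--         #                 break
--         # return result
--         n = len(ineqs)+1
--         result = [0 for _ in range(n)]
--         for i in range(n-2,-1,-1):
--             if ineqs[i] == '<':
--                 for j in range(i,-1,-1):
--                     result[j] = result[j] + 1
--                     if j > 0 and ineqs[j-1] != '<':
--                         break
--         return result
-- ===== SOURCE B (Python) =====
-- def getValidIneqs(ineqs, reverse=False):
--     # Single reverse pass: keep the running length of the current run of
--     # matching inequality signs instead of re-incrementing prefixes run by run.
--     c = '>' if reverse else '<'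
--     out = [0]
--     run = 0
--     for s in reversed(ineqs):
--         run = run + 1 if s == c else 0
--         out.append(run)
--     out.reverse()
--     return out
-- ===== Notes on version B (the rewrite author's own statement) =====
-- stated objective: alternative
-- what changed: Replaces the nested loops (each matching sign walks back re-incrementing every cell to the start of its run) with a single reverse pass that keeps a running count of the current run of matching signs; quadratic worst-case behaviour of A only shows on long runs of matching signs, so no speed is claimed.
import Mathlib
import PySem

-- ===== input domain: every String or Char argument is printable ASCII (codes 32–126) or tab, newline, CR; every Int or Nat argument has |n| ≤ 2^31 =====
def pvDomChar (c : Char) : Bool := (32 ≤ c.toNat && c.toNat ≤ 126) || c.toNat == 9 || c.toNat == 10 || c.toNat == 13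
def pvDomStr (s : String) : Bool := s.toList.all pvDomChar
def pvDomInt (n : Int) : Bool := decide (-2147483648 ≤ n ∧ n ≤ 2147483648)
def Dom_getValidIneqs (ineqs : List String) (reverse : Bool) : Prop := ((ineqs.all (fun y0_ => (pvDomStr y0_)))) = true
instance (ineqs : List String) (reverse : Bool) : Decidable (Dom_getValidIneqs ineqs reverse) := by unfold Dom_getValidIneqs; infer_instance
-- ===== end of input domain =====

-- B replaces A's nested prefix re-increment loops with a single reverse pass that
-- keeps the running length of the current run of matching signs (alternative algorithm).

-- ===== PORT A =====
-- inner loop `for j in range(i,-1,-1): result[j] += 1; if j > 0 and ineqs[j-1] != c: break`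
def pvInnerA (ineqs : List String) (c : String) : Nat → List Int → List Int
  | 0, result => result.set 0 (result.getD 0 0 + 1)
  | j+1, result =>
      let result := result.set (j+1) (result.getD (j+1) 0 + 1)
      if ineqs.getD j "" ≠ c then result
      else pvInnerA ineqs c j result

-- outer loop `for i in range(n-2,-1,-1): if ineqs[i] == c: <inner loop>`
-- (fuel k+1 processes index i = k, then recurses: i runs n-2, n-3, …, 0)
def pvOuterA (ineqs : List String) (c : String) : Nat → List Int → List Int
  | 0, result => result
  | k+1, result =>
      let result := if ineqs.getD k "" = c then pvInnerA ineqs c k result else result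
      pvOuterA ineqs c k result

def getValidIneqs (ineqs : List String) (reverse : Bool) : List Int :=
  if reverse then
    let n := ineqs.length + 1
    let result := List.replicate n (0 : Int)
    pvOuterA ineqs ">" (n - 1) result
  else
    let n := ineqs.length + 1
    let result := List.replicate n (0 : Int)
    pvOuterA ineqs "<" (n - 1) result

-- ===== PORT B =====
-- `for s in reversed(ineqs): run = run + 1 if s == c else 0; out.append(run)`
def pvLoopB (c : String) : List String → (List Int × Int) → (List Int × Int)
  | [], st => st
  | s :: rest, (out, run) =>
      let run := if s = c then run + 1 else 0
      pvLoopB c rest (out ++ [run], run)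

def getValidIneqs_alt (ineqs : List String) (reverse : Bool) : List Int :=
  let c := if reverse then ">" else "<"
  let st := pvLoopB c ineqs.reverse ([0], 0)
  st.1.reverse

-- ===== PRECONDITION & SPEC =====
def Spec_getValidIneqs (ineqs : List String) (reverse : Bool) (out : List Int) : Prop := out = getValidIneqs_alt ineqs reverse
instance (ineqs : List String) (reverse : Bool) (out : List Int) : Decidable (Spec_getValidIneqs ineqs reverse out) := by unfold Spec_getValidIneqs; infer_instance

-- ===== CLAIM (what is proved, stated in full; the proofs are below) =====
def Claim_equal_getValidIneqs : Prop := ∀ (ineqs : List String) (reverse : Bool), Dom_getValidIneqs ineqs reverse → Spec_getValidIneqs ineqs reverse (getValidIneqs ineqs reverse)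

-- ===== LEMMAS AND PROOFS =====

-- run length of leading `c`s
def runF (c : String) : List String → Int
  | [] => 0
  | s :: r => if s = c then runF c r + 1 else 0

-- the common value of both programs: run lengths of each suffix, then a final 0
def outF (c : String) : List String → List Int
  | [] => [0]
  | s :: r => runF c (s :: r) :: outF c r

-- the list of run values produced by B's loop, given the incoming run value
def gB (c : String) : List String → Int → List Int
  | [], _ => []
  | s :: rest, run =>
      let r := if s = c then run + 1 else 0
      r :: gB c rest r

-- inner loop of A reaches index m starting from j
def reachB (ineqs : List String) (c : String) (j m : Nat) : Bool :=
  decide (m ≤ j) && (List.range' m (j - m)).all (fun t => ineqs.getD t "" == c)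

-- total increment at index m after outer iterations i = k-1, …, 0
def cntA (ineqs : List String) (c : String) : Nat → Nat → Int
  | 0, _ => 0
  | k+1, m => cntA ineqs c k m + (if ineqs.getD k "" = c ∧ reachB ineqs c k m then 1 else 0)

-- fuelled run length at position m
def runG (ineqs : List String) (c : String) : Nat → Nat → Int
  | 0, _ => 0
  | f+1, m => if ineqs.getD m "" = c then runG ineqs c f (m+1) + 1 else 0

theorem getD_set (l : List Int) (k : Nat) (v : Int) (m : Nat) (hk : k < l.length) :
    (l.set k v).getD m 0 = if m = k then v else l.getD m 0 := by
  rcases eq_or_ne m k with rfl | h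
  · simp [List.getD_eq_getElem?_getD, hk]
  · simp [List.getD_eq_getElem?_getD, h, (Ne.symm h : k ≠ m)]

theorem reachB_zero (ineqs : List String) (c : String) (m : Nat) :
    reachB ineqs c 0 m = decide (m = 0) := by
  simp [reachB]

theorem reachB_of_gt (ineqs : List String) (c : String) {j m : Nat} (h : j < m) :
    reachB ineqs c j m = false := by
  simp [reachB]; omega

theorem reachB_succ_self (ineqs : List String) (c : String) (j : Nat) :
    reachB ineqs c (j+1) (j+1) = true := by
  simp [reachB]

theorem reachB_succ (ineqs : List String) (c : String) {j m : Nat} (hm : m ≤ j) :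
    reachB ineqs c (j+1) m = (reachB ineqs c j m && (ineqs.getD j "" == c)) := by
  have h1 : j + 1 - m = (j - m) + 1 := by omega
  have h2 : m + (j - m) = j := by omega
  simp only [reachB, h1, List.range'_concat, Nat.one_mul, h2, List.all_append,
    List.all_cons, List.all_nil, Bool.and_true]
  have : (decide (m ≤ j + 1)) = true := by simp; omega
  have h3 : (decide (m ≤ j)) = true := by simpa using hm
  rw [this, h3, Bool.true_and, Bool.true_and]

theorem innerA_length (ineqs : List String) (c : String) :
    ∀ (j : Nat) (res : List Int), (pvInnerA ineqs c j res).length = res.length := by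
  intro j
  induction j with
  | zero => intro res; simp [pvInnerA]
  | succ j ih =>
      intro res
      rw [pvInnerA]
      by_cases hc : ineqs.getD j "" = c
      · simp only [hc, ne_eq, not_true_eq_false, if_false, ih, List.length_set]
      · simp only [ne_eq, hc, not_false_eq_true, if_true, List.length_set]

theorem innerA_getD (ineqs : List String) (c : String) :
    ∀ (j : Nat) (res : List Int) (m : Nat), j < res.length →
      (pvInnerA ineqs c j res).getD m 0
        = res.getD m 0 + (if reachB ineqs c j m then 1 else 0) := by
  intro j
  induction j with
  | zero =>
      intro res m h
      rw [pvInnerA, getD_set _ _ _ _ h, reachB_zero]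
      rcases eq_or_ne m 0 with rfl | hm
      · simp
      · simp [hm]
  | succ j ih =>
      intro res m h
      rw [pvInnerA]
      by_cases hc : ineqs.getD j "" = c
      · simp only [hc, ne_eq, not_true_eq_false, if_false]
        rw [ih _ m (by simp [List.length_set]; omega), getD_set _ _ _ _ h]
        rcases eq_or_ne m (j+1) with rfl | hm
        · rw [reachB_of_gt ineqs c (by omega : j < j + 1), reachB_succ_self]
          simp
        · rcases Nat.lt_or_ge j m with hgt | hle
          · have h1 : j + 1 < m := by omega
            rw [reachB_of_gt ineqs c (by omega : j < m),
              reachB_of_gt ineqs c (by omega : j + 1 < m)]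
            simp [hm]
          · rw [reachB_succ ineqs c hle]
            have hc' : ineqs[j]?.getD "" = c := by
              simpa [List.getD_eq_getElem?_getD] using hc
            simp [hm, hc']
      · simp only [ne_eq, hc, not_false_eq_true, if_true]
        rw [getD_set _ _ _ _ h]
        rcases eq_or_ne m (j+1) with rfl | hm
        · rw [reachB_succ_self]; simp
        · rcases Nat.lt_or_ge j m with hgt | hle
          · rw [reachB_of_gt ineqs c (by omega : j + 1 < m)]
            simp [hm]
          · rw [reachB_succ ineqs c hle]
            have hc' : ¬ ineqs[j]?.getD "" = c := by
              simpa [List.getD_eq_getElem?_getD] using hc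
            simp [hm, hc']

theorem outerA_length (ineqs : List String) (c : String) :
    ∀ (k : Nat) (res : List Int), (pvOuterA ineqs c k res).length = res.length := by
  intro k
  induction k with
  | zero => intro res; simp [pvOuterA]
  | succ k ih =>
      intro res
      rw [pvOuterA]
      by_cases hc : ineqs.getD k "" = c
      · simp only [hc, if_true, ih, innerA_length]
      · simp only [hc, if_false, ih]

theorem outerA_getD (ineqs : List String) (c : String) :
    ∀ (k : Nat) (res : List Int) (m : Nat), k ≤ res.length →
      (pvOuterA ineqs c k res).getD m 0 = res.getD m 0 + cntA ineqs c k m := by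
  intro k
  induction k with
  | zero => intro res m _; simp [pvOuterA, cntA]
  | succ k ih =>
      intro res m h
      rw [pvOuterA, cntA]
      by_cases hc : ineqs.getD k "" = c
      · simp only [hc, if_true, true_and]
        rw [ih _ m (by rw [innerA_length]; omega),
          innerA_getD ineqs c k res m (by omega)]
        by_cases hr : reachB ineqs c k m = true <;> simp [hr] <;> ring
      · simp only [hc, if_false, false_and]
        rw [ih _ m (by omega)]
        simp

theorem runG_succ (ineqs : List String) (c : String) :
    ∀ (f m : Nat), runG ineqs c (f+1) m
      = runG ineqs c f m
        + (if (List.range' m (f+1)).all (fun t => ineqs.getD t "" == c) then 1 else 0) := by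
  intro f
  induction f with
  | zero =>
      intro m
      by_cases hc : ineqs.getD m "" = c <;> simp [runG, List.range'_one]
  | succ f ih =>
      intro m
      rw [show runG ineqs c (f+1+1) m
            = if ineqs.getD m "" = c then runG ineqs c (f+1) (m+1) + 1 else 0 from rfl,
        ih (m+1),
        show runG ineqs c (f+1) m
            = if ineqs.getD m "" = c then runG ineqs c f (m+1) + 1 else 0 from rfl,
        show List.range' m (f+1+1) = m :: List.range' (m+1) (f+1) from List.range'_succ]
      by_cases hc : ineqs.getD m "" = c
      · have hb : (ineqs.getD m "" == c) = true := by simpa using hc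
        rw [if_pos hc, if_pos hc, List.all_cons, hb, Bool.true_and]
        ring
      · have hb : (ineqs.getD m "" == c) = false := by simpa using hc
        rw [if_neg hc, if_neg hc, List.all_cons, hb, Bool.false_and]
        simp

theorem cntA_eq_runG (ineqs : List String) (c : String) :
    ∀ (k m : Nat), cntA ineqs c k m = runG ineqs c (k - m) m := by
  intro k
  induction k with
  | zero => intro m; simp [cntA, runG]
  | succ k ih =>
      intro m
      rcases Nat.lt_or_ge k m with hm' | hm'
      · have h1 : k + 1 - m = 0 := by omega
        have h2 : k - m = 0 := by omega
        rw [cntA, ih, h1, h2, reachB_of_gt ineqs c hm']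
        simp [runG]
      · have hm : m ≤ k := hm'
        have h1 : k + 1 - m = (k - m) + 1 := by omega
        have h2 : m + (k - m) = k := by omega
        rw [cntA, ih, h1, runG_succ, List.range'_concat, Nat.one_mul, h2]
        congr 1
        rw [List.all_append, List.all_cons, List.all_nil, Bool.and_true]
        have h3 : reachB ineqs c k m = (List.range' m (k - m)).all (fun t => ineqs.getD t "" == c) := by
          simp [reachB, hm]
        by_cases hc : ineqs.getD k "" = c
        · have hc' : ineqs[k]?.getD "" = c := by
            simpa [List.getD_eq_getElem?_getD] using hc
          simp [h3, hc']
        · have hc' : ¬ ineqs[k]?.getD "" = c := by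
            simpa [List.getD_eq_getElem?_getD] using hc
          simp [h3, hc']

theorem runG_eq_runF (ineqs : List String) (c : String) :
    ∀ (f m : Nat), ineqs.length - m = f → runG ineqs c f m = runF c (ineqs.drop m) := by
  intro f
  induction f with
  | zero =>
      intro m h
      rw [List.drop_eq_nil_of_le (by omega)]
      simp [runG, runF]
  | succ f ih =>
      intro m h
      have hm : m < ineqs.length := by omega
      rw [List.drop_eq_getElem_cons hm]
      rw [show runG ineqs c (f+1) m
            = if ineqs.getD m "" = c then runG ineqs c f (m+1) + 1 else 0 from rfl,
        List.getD_eq_getElem ineqs "" hm, ih (m+1) (by omega)]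
      rfl

theorem outF_length (c : String) : ∀ (l : List String), (outF c l).length = l.length + 1 := by
  intro l
  induction l with
  | nil => simp [outF]
  | cons s r ih => simp [outF, ih]

theorem outF_getD (c : String) :
    ∀ (l : List String) (m : Nat), (outF c l).getD m 0 = runF c (l.drop m) := by
  intro l
  induction l with
  | nil =>
      intro m
      cases m <;> simp [outF, runF]
  | cons s r ih =>
      intro m
      cases m with
      | zero => simp [outF]
      | succ m => simpa [outF] using ih m

theorem A_eq_outF (ineqs : List String) (c : String) :
    pvOuterA ineqs c ineqs.length (List.replicate (ineqs.length + 1) (0 : Int)) = outF c ineqs := by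
  have hlen : (pvOuterA ineqs c ineqs.length (List.replicate (ineqs.length + 1) (0 : Int))).length
      = ineqs.length + 1 := by
    rw [outerA_length]; simp
  apply List.ext_getElem
  · rw [hlen, outF_length]
  · intro i h1 h2
    rw [← List.getD_eq_getElem _ 0 h1, ← List.getD_eq_getElem _ 0 h2,
      outerA_getD ineqs c ineqs.length _ i (by simp), outF_getD,
      cntA_eq_runG, runG_eq_runF ineqs c _ i rfl]
    have : (List.replicate (ineqs.length + 1) (0 : Int)).getD i 0 = 0 := by
      rw [List.getD_eq_getElem?_getD, List.getElem?_replicate]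
      split <;> simp
    rw [this]; ring

theorem gB_append (c : String) :
    ∀ (xs ys : List String) (run : Int),
      gB c (xs ++ ys) run = gB c xs run ++ gB c ys ((gB c xs run).getLastD run) := by
  intro xs
  induction xs with
  | nil => intro ys run; simp [gB]
  | cons s rest ih =>
      intro ys run
      simp only [List.cons_append, gB, ih, List.getLastD_cons]

theorem loopB_fst (c : String) :
    ∀ (l : List String) (out : List Int) (run : Int),
      (pvLoopB c l (out, run)).1 = out ++ gB c l run := by
  intro l
  induction l with
  | nil => intro out run; simp [pvLoopB, gB]
  | cons s rest ih =>
      intro out run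
      rw [pvLoopB, gB, ih]
      simp

theorem gB_rev (c : String) :
    ∀ (l : List String),
      (gB c l.reverse 0).reverse ++ [0] = outF c l ∧ (gB c l.reverse 0).getLastD 0 = runF c l := by
  intro l
  induction l with
  | nil => simp [gB, outF, runF]
  | cons s rest ih =>
      have hrev : (s :: rest).reverse = rest.reverse ++ [s] := by simp
      have hg : gB c (s :: rest).reverse 0
          = gB c rest.reverse 0 ++ [if s = c then (gB c rest.reverse 0).getLastD 0 + 1 else 0] := by
        rw [hrev, gB_append]
        rfl
      constructor
      · have houtF : outF c (s :: rest)
            = (if s = c then runF c rest + 1 else 0) :: outF c rest := rfl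
        rw [hg, ih.2, houtF, ← ih.1]
        simp
      · rw [hg, ih.2, List.getLastD_concat]
        rfl

theorem B_eq_outF (ineqs : List String) (c : String) :
    (pvLoopB c ineqs.reverse ([0], 0)).1.reverse = outF c ineqs := by
  rw [loopB_fst, List.reverse_append]
  simpa using (gB_rev c ineqs).1

-- ===== VERDICT (by name: the statement is the Claim_ definition above) =====
theorem getValidIneqs_spec : Claim_equal_getValidIneqs := by
  intro ineqs rev _
  unfold Spec_getValidIneqs getValidIneqs getValidIneqs_alt
  cases rev <;> simp only [if_true, if_false, Bool.false_eq_true, Nat.add_sub_cancel] <;>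
    rw [B_eq_outF, ← A_eq_outF]
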